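-- pv_equiv track=rewrite | github.com/samucj73/Lotoeasy | gerador_lotofacil.py | contar_quadrantes
-- ===== SOURCE A (Python) =====
-- def contar_quadrantes(cartao):
--     quadrantes = {
--         1: set(range(1, 6)) | set(range(6, 11)),       # Quadrante 1 (1-10)
--         2: set(range(11, 16)) | set(range(16, 21)),    # Quadrante 2 (11-20)
--         3: set(range(21, 26))                         # Quadrante 3 (21-25)
--     }
--     usados = set()
--     for d in cartao:
--         for q, dezenas in quadrantes.items():
--             if d in dezenas:
--                 usados.add(q)
--     return len(usados)
-- ===== SOURCE B (Python) =====
-- def contar_quadrantes(cartao):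
--     quadrantes = {
--         1: set(range(1, 6)) | set(range(6, 11)),       # Quadrante 1 (1-10)
--         2: set(range(11, 16)) | set(range(16, 21)),    # Quadrante 2 (11-20)
--         3: set(range(21, 26))                         # Quadrante 3 (21-25)
--     }
--     return sum(1 for dezenas in quadrantes.values()
--                if any(d in dezenas for d in cartao))
-- ===== Notes on version B (the rewrite author's own statement) =====
-- stated objective: simpler
-- what changed: Iterates per quadrant with a short-circuiting any() coverage test and sums booleans, instead of accumulating a set of used quadrant ids over a nested loop per card number.
import Mathlib
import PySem

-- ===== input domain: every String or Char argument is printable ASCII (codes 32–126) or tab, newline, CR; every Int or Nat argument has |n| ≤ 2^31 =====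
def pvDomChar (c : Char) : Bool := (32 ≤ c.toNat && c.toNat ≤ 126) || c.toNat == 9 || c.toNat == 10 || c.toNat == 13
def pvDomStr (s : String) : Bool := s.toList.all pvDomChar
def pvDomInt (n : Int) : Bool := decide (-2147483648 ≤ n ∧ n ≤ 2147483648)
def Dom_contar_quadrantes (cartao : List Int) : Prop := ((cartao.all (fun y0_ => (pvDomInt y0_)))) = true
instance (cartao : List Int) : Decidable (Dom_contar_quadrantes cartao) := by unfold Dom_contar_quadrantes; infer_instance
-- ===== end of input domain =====

-- B iterates per quadrant with an any() coverage test and sums booleans, instead of A's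
-- nested loop per card number accumulating a set of used quadrant ids (objective: simpler).

-- ===== PORT A =====
-- quadrantes = {1: set(range(1,6))|set(range(6,11)), 2: …, 3: set(range(21,26))}
def pvQuadrantesA : PySem.Dict Int (PySem.Set Int) :=
  (((PySem.Dict.empty : PySem.Dict Int (PySem.Set Int)).insert 1
      (PySem.Set.union (PySem.Set.ofList (PySem.List.pyRange 1 6 1)) (PySem.List.pyRange 6 11 1))).insert 2
      (PySem.Set.union (PySem.Set.ofList (PySem.List.pyRange 11 16 1)) (PySem.List.pyRange 16 21 1))).insert 3
      (PySem.Set.ofList (PySem.List.pyRange 21 26 1))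

def contar_quadrantes (cartao : List Int) : Int :=
  PySem.Set.len
    (cartao.foldl (fun u d =>
      (PySem.Dict.items pvQuadrantesA).foldl (fun u qd =>
        if PySem.Set.contains qd.2 d then PySem.Set.add u qd.1 else u) u)
      PySem.Set.empty)

-- ===== PORT B =====
def pvQuadrantesB : List (PySem.Set Int) :=
  [PySem.Set.union (PySem.Set.ofList (PySem.List.pyRange 1 6 1)) (PySem.List.pyRange 6 11 1),
   PySem.Set.union (PySem.Set.ofList (PySem.List.pyRange 11 16 1)) (PySem.List.pyRange 16 21 1),
   PySem.Set.ofList (PySem.List.pyRange 21 26 1)]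

def contar_quadrantes_alt (cartao : List Int) : Int :=
  pvQuadrantesB.foldl (fun acc dezenas =>
    if cartao.any (fun d => PySem.Set.contains dezenas d) then acc + 1 else acc) 0

-- ===== PRECONDITION & SPEC =====
def Spec_contar_quadrantes (cartao : List Int) (out : Int) : Prop := out = contar_quadrantes_alt cartao
instance (cartao : List Int) (out : Int) : Decidable (Spec_contar_quadrantes cartao out) := by unfold Spec_contar_quadrantes; infer_instance

-- ===== CLAIM (what is proved, stated in full; the proofs are below) =====
def Claim_equal_contar_quadrantes : Prop := ∀ (cartao : List Int), Dom_contar_quadrantes cartao → Spec_contar_quadrantes cartao (contar_quadrantes cartao)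

-- ===== LEMMAS AND PROOFS =====

-- the three quadrant sets, as plain lists
def pvQ1 : PySem.Set Int := PySem.Set.union (PySem.Set.ofList (PySem.List.pyRange 1 6 1)) (PySem.List.pyRange 6 11 1)
def pvQ2 : PySem.Set Int := PySem.Set.union (PySem.Set.ofList (PySem.List.pyRange 11 16 1)) (PySem.List.pyRange 16 21 1)
def pvQ3 : PySem.Set Int := PySem.Set.ofList (PySem.List.pyRange 21 26 1)

theorem pv_items_eq : PySem.Dict.items pvQuadrantesA = [(1, pvQ1), (2, pvQ2), (3, pvQ3)] := by decide

theorem pv_quadB_eq : pvQuadrantesB = [pvQ1, pvQ2, pvQ3] := rfl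

-- A's step over one card number, after unfolding the literal items list
def pvStep (u : PySem.Set Int) (d : Int) : PySem.Set Int :=
  let u1 := if PySem.Set.contains pvQ1 d then PySem.Set.add u 1 else u
  let u2 := if PySem.Set.contains pvQ2 d then PySem.Set.add u1 2 else u1
  if PySem.Set.contains pvQ3 d then PySem.Set.add u2 3 else u2

theorem pv_inner_eq (u : PySem.Set Int) (d : Int) :
    ([(1, pvQ1), (2, pvQ2), (3, pvQ3)] : List (Int × PySem.Set Int)).foldl
      (fun u qd => if PySem.Set.contains qd.2 d then PySem.Set.add u qd.1 else u) u = pvStep u d := by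
  simp [List.foldl, pvStep]

theorem pv_mem_condAdd (u : PySem.Set Int) (q : Int) (c : Prop) [Decidable c] (x : Int) :
    x ∈ (if c then PySem.Set.add u q else u) ↔ x ∈ u ∨ (x = q ∧ c) := by
  split_ifs with h <;> simp [PySem.Set.mem_add, h]

theorem pv_mem_step (u : PySem.Set Int) (d x : Int) :
    x ∈ pvStep u d ↔ x ∈ u ∨ (x = 1 ∧ d ∈ pvQ1) ∨ (x = 2 ∧ d ∈ pvQ2) ∨ (x = 3 ∧ d ∈ pvQ3) := by
  simp only [pvStep, PySem.Set.contains_iff, pv_mem_condAdd]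
  tauto

theorem pv_nodup_step (u : PySem.Set Int) (d : Int) (hu : u.Nodup) : (pvStep u d).Nodup := by
  unfold pvStep
  split_ifs <;> repeat' apply PySem.Set.nodup_add
  all_goals exact hu

theorem pv_mem_foldl (l : List Int) (u : PySem.Set Int) (x : Int) :
    x ∈ l.foldl pvStep u ↔ x ∈ u ∨ (x = 1 ∧ ∃ d ∈ l, d ∈ pvQ1)
      ∨ (x = 2 ∧ ∃ d ∈ l, d ∈ pvQ2)
      ∨ (x = 3 ∧ ∃ d ∈ l, d ∈ pvQ3) := by
  induction l generalizing u with
  | nil => simp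
  | cons d l ih =>
    simp only [List.foldl_cons, ih, pv_mem_step, List.mem_cons]
    constructor
    · rintro (((h | ⟨rfl, h⟩ | ⟨rfl, h⟩ | ⟨rfl, h⟩) | ⟨rfl, d', hd', h⟩ | ⟨rfl, d', hd', h⟩ | ⟨rfl, d', hd', h⟩))
      · exact Or.inl h
      · exact Or.inr (Or.inl ⟨rfl, d, Or.inl rfl, h⟩)
      · exact Or.inr (Or.inr (Or.inl ⟨rfl, d, Or.inl rfl, h⟩))
      · exact Or.inr (Or.inr (Or.inr ⟨rfl, d, Or.inl rfl, h⟩))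
      · exact Or.inr (Or.inl ⟨rfl, d', Or.inr hd', h⟩)
      · exact Or.inr (Or.inr (Or.inl ⟨rfl, d', Or.inr hd', h⟩))
      · exact Or.inr (Or.inr (Or.inr ⟨rfl, d', Or.inr hd', h⟩))
    · rintro (h | ⟨rfl, d', (rfl | hd'), h⟩ | ⟨rfl, d', (rfl | hd'), h⟩ | ⟨rfl, d', (rfl | hd'), h⟩)
      · exact Or.inl (Or.inl h)
      · exact Or.inl (Or.inr (Or.inl ⟨rfl, h⟩))
      · exact Or.inr (Or.inl ⟨rfl, d', hd', h⟩)
      · exact Or.inl (Or.inr (Or.inr (Or.inl ⟨rfl, h⟩)))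
      · exact Or.inr (Or.inr (Or.inl ⟨rfl, d', hd', h⟩))
      · exact Or.inl (Or.inr (Or.inr (Or.inr ⟨rfl, h⟩)))
      · exact Or.inr (Or.inr (Or.inr ⟨rfl, d', hd', h⟩))

theorem pv_nodup_foldl (l : List Int) (u : PySem.Set Int) (hu : u.Nodup) : (l.foldl pvStep u).Nodup := by
  induction l generalizing u with
  | nil => exact hu
  | cons d l ih => exact ih _ (pv_nodup_step u d hu)

theorem pv_count (u : List Int) (hu : u.Nodup) (hm : ∀ x ∈ u, x = 1 ∨ x = 2 ∨ x = 3) :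
    (u.length : Int) = (if (1:Int) ∈ u then 1 else 0) + (if (2:Int) ∈ u then 1 else 0)
      + (if (3:Int) ∈ u then 1 else 0) := by
  induction u with
  | nil => simp
  | cons a u ih =>
    rcases List.nodup_cons.mp hu with ⟨ha, hu'⟩
    have ihu := ih hu' (fun x hx => hm x (List.mem_cons_of_mem a hx))
    by_cases m1 : (1:Int) ∈ u <;> by_cases m2 : (2:Int) ∈ u <;> by_cases m3 : (3:Int) ∈ u <;>
      rcases hm a (List.mem_cons_self) with rfl | rfl | rfl <;>
        simp_all [List.mem_cons]

theorem contar_quadrantes_spec' (cartao : List Int) :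
    contar_quadrantes cartao = contar_quadrantes_alt cartao := by
  have hstep : (fun (u : PySem.Set Int) (d : Int) =>
      (PySem.Dict.items pvQuadrantesA).foldl (fun u qd =>
        if PySem.Set.contains qd.2 d then PySem.Set.add u qd.1 else u) u) = pvStep := by
    funext u d
    rw [pv_items_eq]
    exact pv_inner_eq u d
  unfold contar_quadrantes
  rw [hstep]
  set fin := cartao.foldl pvStep PySem.Set.empty with hfin
  have hnd : fin.Nodup := pv_nodup_foldl _ _ (by simp [PySem.Set.empty])
  have hsub : ∀ x ∈ fin, x = 1 ∨ x = 2 ∨ x = 3 := by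
    intro x hx
    rcases (pv_mem_foldl cartao PySem.Set.empty x).mp hx with h | ⟨h, _⟩ | ⟨h, _⟩ | ⟨h, _⟩
    · simp [PySem.Set.empty] at h
    · exact Or.inl h
    · exact Or.inr (Or.inl h)
    · exact Or.inr (Or.inr h)
  have h1 : ((1:Int) ∈ fin) ↔ ∃ d ∈ cartao, d ∈ pvQ1 := by
    rw [hfin, pv_mem_foldl]; simp [PySem.Set.empty]
  have h2 : ((2:Int) ∈ fin) ↔ ∃ d ∈ cartao, d ∈ pvQ2 := by
    rw [hfin, pv_mem_foldl]; simp [PySem.Set.empty]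
  have h3 : ((3:Int) ∈ fin) ↔ ∃ d ∈ cartao, d ∈ pvQ3 := by
    rw [hfin, pv_mem_foldl]; simp [PySem.Set.empty]
  have hlen : PySem.Set.len fin = (fin.length : Int) := rfl
  rw [hlen, pv_count fin hnd hsub]
  unfold contar_quadrantes_alt
  rw [pv_quadB_eq]
  simp only [List.foldl_cons, List.foldl_nil, List.any_eq_true, PySem.Set.contains_iff, h1, h2, h3]
  split_ifs <;> omega

-- ===== VERDICT (by name: the statement is the Claim_ definition above) =====
theorem contar_quadrantes_spec : Claim_equal_contar_quadrantes := by
  intro cartao _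
  exact contar_quadrantes_spec' cartao
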